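-- pv_equiv track=rewrite | github.com/Sophanos/circulatio | tools/journey_cli_eval/ritual_mode.py | _planned_after_turn
-- ===== SOURCE A (Python) =====
-- _JSON = dict[str, object]
--
-- def _planned_after_turn(timeline: list[_JSON], scenario: str, turn: str) -> bool:
--     seen_turn = False
--     for item in timeline:
--         if item.get("scenario") != scenario:
--             continue
--         if item.get("turn") == turn:
--             seen_turn = True
--         if seen_turn and item.get("label") == "circulatio_plan_ritual":
--             return True
--     return False
-- ===== SOURCE B (Python) =====
-- def _planned_after_turn(timeline, scenario, turn):
--     matching = [item for item in timeline if item.get("scenario") == scenario]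
--     for i, item in enumerate(matching):
--         if item.get("turn") == turn:
--             return any(it.get("label") == "circulatio_plan_ritual" for it in matching[i:])
--     return False
-- ===== Notes on version B (the rewrite author's own statement) =====
-- stated objective: alternative
-- what changed: Replaces A's single latched-flag pass with filter-by-scenario, locate the first turn match, then an inclusive tail any-scan for the label.
import Mathlib
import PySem

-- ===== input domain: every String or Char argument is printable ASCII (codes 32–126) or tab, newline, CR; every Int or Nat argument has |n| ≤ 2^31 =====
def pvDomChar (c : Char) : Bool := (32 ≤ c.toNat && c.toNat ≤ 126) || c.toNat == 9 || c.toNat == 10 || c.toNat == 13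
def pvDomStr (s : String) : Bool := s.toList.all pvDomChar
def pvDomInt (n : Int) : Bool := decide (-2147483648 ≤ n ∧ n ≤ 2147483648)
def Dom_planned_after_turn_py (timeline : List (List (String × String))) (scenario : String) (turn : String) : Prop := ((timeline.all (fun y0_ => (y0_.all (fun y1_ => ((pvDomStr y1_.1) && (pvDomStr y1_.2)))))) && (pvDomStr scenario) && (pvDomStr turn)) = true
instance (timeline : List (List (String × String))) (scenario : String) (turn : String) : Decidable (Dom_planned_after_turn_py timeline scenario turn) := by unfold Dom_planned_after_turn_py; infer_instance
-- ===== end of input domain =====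

-- B changes the decomposition (filter + locate first turn match + inclusive tail scan)
-- instead of A's latched-flag single pass; same cost, no behavioural change.

-- ===== PORT A =====
-- A's loop with the latched seen_turn flag, item by item.
def pyA_go (scenario turn : String) : List (List (String × String)) → Bool → Bool
  | [], _ => false
  | item :: rest, seen =>
    if (PySem.Dict.mk item).get? "scenario" ≠ some scenario then
      pyA_go scenario turn rest seen
    else
      let seen' := if (PySem.Dict.mk item).get? "turn" = some turn then true else seen
      if seen' ∧ (PySem.Dict.mk item).get? "label" = some "circulatio_plan_ritual" then true
      else pyA_go scenario turn rest seen'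

def planned_after_turn_py (timeline : List (List (String × String))) (scenario : String) (turn : String) : Bool :=
  pyA_go scenario turn timeline false

-- ===== PORT B =====
-- scan the filtered list for the first turn match; 'matching[i:]' is item :: rest here
def pyB_find (turn : String) : List (List (String × String)) → Bool
  | [] => false
  | item :: rest =>
    if (PySem.Dict.mk item).get? "turn" = some turn then
      (item :: rest).any (fun it => (PySem.Dict.mk it).get? "label" == some "circulatio_plan_ritual")
    else pyB_find turn rest

def planned_after_turn_py_alt (timeline : List (List (String × String))) (scenario : String) (turn : String) : Bool :=
  let matching := timeline.filter (fun item => (PySem.Dict.mk item).get? "scenario" == some scenario)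
  pyB_find turn matching

-- ===== PRECONDITION & SPEC =====
def Spec_planned_after_turn_py (timeline : List (List (String × String))) (scenario : String) (turn : String) (out : Bool) : Prop := out = planned_after_turn_py_alt timeline scenario turn
instance (timeline : List (List (String × String))) (scenario : String) (turn : String) (out : Bool) : Decidable (Spec_planned_after_turn_py timeline scenario turn out) := by unfold Spec_planned_after_turn_py; infer_instance

-- ===== CLAIM (what is proved, stated in full; the proofs are below) =====
def Claim_equal_planned_after_turn_py : Prop := ∀ (timeline : List (List (String × String))) (scenario : String) (turn : String), Dom_planned_after_turn_py timeline scenario turn → Spec_planned_after_turn_py timeline scenario turn (planned_after_turn_py timeline scenario turn)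

-- ===== LEMMAS AND PROOFS =====

-- A's pass over the raw timeline equals the same flag-pass over the scenario-filtered list.
def pyGoF (turn : String) : List (List (String × String)) → Bool → Bool
  | [], _ => false
  | item :: rest, seen =>
    let seen' := if (PySem.Dict.mk item).get? "turn" = some turn then true else seen
    if seen' ∧ (PySem.Dict.mk item).get? "label" = some "circulatio_plan_ritual" then true
    else pyGoF turn rest seen'

theorem pyA_go_filter (scenario turn : String) (l : List (List (String × String))) (seen : Bool) :
    pyA_go scenario turn l seen =
      pyGoF turn (l.filter (fun item => (PySem.Dict.mk item).get? "scenario" == some scenario)) seen := by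
  induction l generalizing seen with
  | nil => rfl
  | cons item rest ih =>
    by_cases h : (PySem.Dict.mk item).get? "scenario" = some scenario
    · simp [pyA_go, pyGoF, h, ih]
    · simp [pyA_go, h, ih]

-- With the flag already set, the flag-pass is an any-scan for the label.
theorem pyGoF_true (turn : String) (l : List (List (String × String))) :
    pyGoF turn l true = l.any (fun it => (PySem.Dict.mk it).get? "label" == some "circulatio_plan_ritual") := by
  induction l with
  | nil => rfl
  | cons item rest ih =>
    by_cases h : (PySem.Dict.mk item).get? "label" = some "circulatio_plan_ritual"
    · simp [pyGoF, h]
    · simp [pyGoF, h, ih]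

-- With the flag unset, the flag-pass is B's locate-then-scan.
theorem pyGoF_false (turn : String) (l : List (List (String × String))) :
    pyGoF turn l false = pyB_find turn l := by
  induction l with
  | nil => rfl
  | cons item rest ih =>
    by_cases ht : (PySem.Dict.mk item).get? "turn" = some turn
    · simp only [pyGoF, pyB_find, ht, if_true]
      by_cases h : (PySem.Dict.mk item).get? "label" = some "circulatio_plan_ritual"
      · simp [h]
      · simp [h, pyGoF_true]
    · simp [pyGoF, pyB_find, ht, ih]

-- ===== VERDICT (by name: the statement is the Claim_ definition above) =====
theorem planned_after_turn_py_spec : Claim_equal_planned_after_turn_py := by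
  intro timeline scenario turn _
  unfold Spec_planned_after_turn_py planned_after_turn_py planned_after_turn_py_alt
  rw [pyA_go_filter, pyGoF_false]
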